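-- pv_equiv track=rewrite | github.com/iZhang/Python | CS101_Eclipse/apt_fortunatenumbers/src/FortunateNumbers.py | getFortunate
-- ===== SOURCE A (Python) =====
-- def getFortunate(a,b,c):
--     fortunateNums = []
--     for one in a:
--         for two in b:
--             for three in c:
--                 if str(one+two+three).count('5') + str(one+two+three).count('8') == len(str(one+two+three)):
--                     fortunateNums.append(one+two+three)
--     return len(set(fortunateNums))
-- ===== SOURCE B (Python) =====
-- def getFortunate(a, b, c):
--     # Enumerate candidate fortunate numbers (digits all 5/8) up to max possible sum,
--     # and count those reachable as a triple sum via a set of pairwise sums a+b.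
--     if not a or not b or not c:
--         return 0
--     limit = max(a) + max(b) + max(c)
--     ab = {x + y for x in a for y in b}
--     count = 0
--     layer = [0]
--     for _ in range(len(str(limit))):
--         layer = [10 * f + d for f in layer for d in (5, 8)]
--         for f in layer:
--             if f <= limit and any(f - z in ab for z in c):
--                 count += 1
--     return count
-- ===== Notes on version B (the rewrite author's own statement) =====
-- stated objective: faster
-- what changed: A enumerates all |a||b||c| triple sums and string-tests each one's digits; B never inspects the sums' digits: it generates the few candidate numbers whose digits are all 5 or 8 (layer by layer, up to the maximum possible sum) and counts those reachable as a triple sum using a precomputed set of pairwise sums a+b plus a scan of c (meet-in-the-middle).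
import Mathlib
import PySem

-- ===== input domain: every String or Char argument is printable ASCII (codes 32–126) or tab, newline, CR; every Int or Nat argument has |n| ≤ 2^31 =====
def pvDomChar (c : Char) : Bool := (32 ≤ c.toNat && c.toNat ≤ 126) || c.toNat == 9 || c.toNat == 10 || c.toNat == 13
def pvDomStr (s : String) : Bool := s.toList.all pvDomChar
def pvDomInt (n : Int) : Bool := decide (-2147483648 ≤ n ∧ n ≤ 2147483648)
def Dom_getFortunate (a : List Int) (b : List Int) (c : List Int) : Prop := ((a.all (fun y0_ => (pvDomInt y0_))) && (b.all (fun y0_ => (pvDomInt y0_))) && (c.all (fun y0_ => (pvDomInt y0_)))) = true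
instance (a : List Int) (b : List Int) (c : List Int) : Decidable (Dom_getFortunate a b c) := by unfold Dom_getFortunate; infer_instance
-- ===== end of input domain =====

-- B generates the candidate numbers with digits all 5/8 (layer by layer up to the maximum
-- possible sum) and counts those reachable via a set of pairwise sums a+b plus a scan of c.

-- ===== PORT A =====
def getFortunate (a : List Int) (b : List Int) (c : List Int) : Int :=
  let fortunateNums : List Int :=
    a.foldl (fun acc one =>
      b.foldl (fun acc two =>
        c.foldl (fun acc three =>
          if ((PySem.Str.count (PySem.Int.toStr (one + two + three)) "5"
                + PySem.Str.count (PySem.Int.toStr (one + two + three)) "8" : Nat) : Int)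
              == PySem.Str.len (PySem.Int.toStr (one + two + three))
          then acc ++ [one + two + three] else acc) acc) acc) []
  PySem.Set.len (PySem.Set.ofList fortunateNums)

-- ===== PORT B =====
def getFortunate_alt (a : List Int) (b : List Int) (c : List Int) : Int :=
  if a.isEmpty || b.isEmpty || c.isEmpty then 0
  else
    let limit := (PySem.List.max? a (fun x => x)).getD 0
                 + (PySem.List.max? b (fun x => x)).getD 0
                 + (PySem.List.max? c (fun x => x)).getD 0
    let ab : PySem.Set Int :=
      a.foldl (fun s x => b.foldl (fun s y => PySem.Set.add s (x + y)) s) PySem.Set.empty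
    ((PySem.List.pyRange 0 (PySem.Str.len (PySem.Int.toStr limit)) 1).foldl
      (fun (st : List Int × Int) _ =>
        let layer := st.1.flatMap (fun f => [10 * f + 5, 10 * f + 8])
        (layer,
         layer.foldl (fun cnt f =>
           if f ≤ limit && c.any (fun z => PySem.Set.contains ab (f - z)) then cnt + 1 else cnt)
           st.2))
      ([0], (0 : Int))).2

-- ===== PRECONDITION & SPEC =====
def Spec_getFortunate (a : List Int) (b : List Int) (c : List Int) (out : Int) : Prop := out = getFortunate_alt a b c
instance (a : List Int) (b : List Int) (c : List Int) (out : Int) : Decidable (Spec_getFortunate a b c out) := by unfold Spec_getFortunate; infer_instance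

-- ===== CLAIM (what is proved, stated in full; the proofs are below) =====
def Claim_equal_getFortunate : Prop := ∀ (a : List Int) (b : List Int) (c : List Int), Dom_getFortunate a b c → Spec_getFortunate a b c (getFortunate a b c)

-- ===== LEMMAS AND PROOFS =====

-- A's filter predicate, named
def pvPredA (v : Int) : Bool :=
  ((PySem.Str.count (PySem.Int.toStr v) "5" + PySem.Str.count (PySem.Int.toStr v) "8" : Nat) : Int)
    == PySem.Str.len (PySem.Int.toStr v)

-- the flat list of all triple-sums, in A's traversal order
def pvSums (a b c : List Int) : List Int :=
  a.flatMap (fun one => b.flatMap (fun two => c.map (fun three => one + two + three)))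

-- layer construction of B
def pvStep (layer : List Int) : List Int := layer.flatMap (fun f => [10 * f + 5, 10 * f + 8])

def pvLayers : Nat → List Int
  | 0 => [0]
  | k + 1 => pvStep (pvLayers k)

-- "all decimal digits are 5 or 8"
def pvAll58 (l : List Char) : Bool := l.all (fun ch => ch == '5' || ch == '8')

-- B's filter predicate given limit and the triple-sum list
def pvPredB (limit : Int) (a b c : List Int) (f : Int) : Bool :=
  f ≤ limit && c.any (fun z =>
    PySem.Set.contains
      (a.foldl (fun s x => b.foldl (fun s y => PySem.Set.add s (x + y)) s) PySem.Set.empty)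
      (f - z))

-- ---------- single-character count (A's digit test) ----------
theorem count_go_single (ch : Char) (l : List Char) (fuel acc : Nat) (h : l.length ≤ fuel) :
    PySem.Chars.count.go [ch] fuel l acc = acc + l.count ch := by
  induction fuel generalizing l acc with
  | zero =>
    cases l with
    | nil => simp [PySem.Chars.count.go]
    | cons x t => simp at h
  | succ n ih =>
    cases l with
    | nil => simp [PySem.Chars.count.go]
    | cons x t =>
      have ht : t.length ≤ n := by simpa using h
      by_cases hx : x = ch
      · subst hx
        simp [PySem.Chars.count.go, List.isPrefixOf, ih t (acc + 1) ht]
        omega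
      · simp [PySem.Chars.count.go, List.isPrefixOf, hx, ih t acc ht, Ne.symm hx]

theorem count_single (ch : Char) (l : List Char) :
    PySem.Chars.count l [ch] = l.count ch := by
  simpa [PySem.Chars.count] using count_go_single ch l l.length 0 le_rfl

theorem count58 (l : List Char) :
    l.count '5' + l.count '8' = l.length ↔ ∀ x ∈ l, x = '5' ∨ x = '8' := by
  have h58 : ∀ u : List Char, u.count '5' + u.count '8' ≤ u.length := by
    intro u
    induction u with
    | nil => simp
    | cons z r ihr =>
      rw [List.count_cons, List.count_cons, List.length_cons]
      by_cases hz5 : z = '5'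
      · subst hz5; simp; omega
      · by_cases hz8 : z = '8'
        · subst hz8; simp; omega
        · simp [hz5, hz8]; omega
  induction l with
  | nil => simp
  | cons y t ih =>
    have ht := h58 t
    by_cases hy5 : y = '5'
    · subst hy5
      rw [List.count_cons, List.count_cons]
      simp [← ih]
      omega
    · by_cases hy8 : y = '8'
      · subst hy8
        rw [List.count_cons, List.count_cons]
        simp [← ih]
        omega
      · rw [List.count_cons, List.count_cons]
        simp [hy5, hy8]
        omega

theorem predA_iff_all58 (v : Int) : pvPredA v = true ↔ pvAll58 (PySem.Int.toChars v) = true := by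
  unfold pvPredA pvAll58
  rw [PySem.Str.count_eq, PySem.Str.count_eq, PySem.Str.len_eq, PySem.Int.toList_toStr]
  simp only [show ("5" : String).toList = ['5'] from rfl, show ("8" : String).toList = ['8'] from rfl,
    count_single, beq_iff_eq, Nat.cast_add, List.all_eq_true]
  constructor
  · intro hcnt x hx
    have := (count58 (PySem.Int.toChars v)).mp (by exact_mod_cast hcnt)
    rcases this x hx with h | h <;> simp [h]
  · intro hall
    have : ∀ x ∈ PySem.Int.toChars v, x = '5' ∨ x = '8' := by
      intro x hx
      have := hall x hx
      rcases Bool.or_eq_true_iff.mp this with h | h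
      · exact Or.inl (by simpa using h)
      · exact Or.inr (by simpa using h)
    exact_mod_cast (count58 _).mpr this

-- ---------- Nat.toDigits structural lemmas ----------
theorem toDigitsCore_acc (fuel n : Nat) (ds : List Char) :
    Nat.toDigitsCore 10 fuel n ds = Nat.toDigitsCore 10 fuel n [] ++ ds := by
  induction fuel generalizing n ds with
  | zero => simp [Nat.toDigitsCore]
  | succ f ih =>
    simp only [Nat.toDigitsCore]
    by_cases h : n / 10 = 0
    · simp [h]
    · simp only [h]
      rw [ih (n / 10) (Nat.digitChar (n % 10) :: ds), ih (n / 10) [Nat.digitChar (n % 10)]]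
      simp

theorem toDigitsCore_fuel (n : Nat) : ∀ (fuel : Nat) (ds : List Char), n < fuel →
    Nat.toDigitsCore 10 fuel n ds = Nat.toDigitsCore 10 (n + 1) n ds := by
  induction n using Nat.strong_induction_on with
  | _ n ih =>
    intro fuel ds h
    match fuel, h with
    | f + 1, _ =>
      simp only [Nat.toDigitsCore]
      by_cases h0 : n / 10 = 0
      · simp [h0]
      · simp only [h0]
        have hlt : n / 10 < n := Nat.div_lt_self (by omega) (by omega)
        rw [ih (n / 10) hlt f _ (by omega), ih (n / 10) hlt n _ (by omega)]

theorem toDigits_step (n : Nat) (h : 10 ≤ n) :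
    Nat.toDigits 10 n = Nat.toDigits 10 (n / 10) ++ [Nat.digitChar (n % 10)] := by
  have h0 : n / 10 ≠ 0 := by
    intro hh; have : n < 10 := Nat.lt_of_div_eq_zero (by omega) hh; omega
  unfold Nat.toDigits
  conv_lhs => simp only [Nat.toDigitsCore, h0, reduceIte]
  rw [toDigitsCore_fuel (n / 10) n _ (Nat.div_lt_self (by omega) (by omega)), toDigitsCore_acc]

theorem toDigits_lt_ten (n : Nat) (h : n < 10) :
    Nat.toDigits 10 n = [Nat.digitChar n] := by
  have h0 : n / 10 = 0 := Nat.div_eq_of_lt h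
  have h1 : n % 10 = n := Nat.mod_eq_of_lt h
  simp [Nat.toDigits, Nat.toDigitsCore, h0, h1]

theorem toDigits_mul_add (f d : Nat) (hf : 0 < f) (hd : d < 10) :
    Nat.toDigits 10 (10 * f + d) = Nat.toDigits 10 f ++ [Nat.digitChar d] := by
  rw [toDigits_step _ (by omega), show (10 * f + d) / 10 = f by omega,
    show (10 * f + d) % 10 = d by omega]

theorem toDigits_length_pos (n : Nat) : 0 < (Nat.toDigits 10 n).length := by
  by_cases h : n < 10
  · rw [toDigits_lt_ten n h]; simp
  · rw [toDigits_step n (by omega)]; simp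

theorem toDigits_length_mono (n : Nat) : ∀ m : Nat, m ≤ n →
    (Nat.toDigits 10 m).length ≤ (Nat.toDigits 10 n).length := by
  induction n using Nat.strong_induction_on with
  | _ n ih =>
    intro m h
    by_cases hn : n < 10
    · rw [toDigits_lt_ten m (by omega), toDigits_lt_ten n hn]
      simp
    · by_cases hm : m < 10
      · rw [toDigits_step n (by omega), toDigits_lt_ten m hm]
        have := toDigits_length_pos (n / 10)
        simp only [List.length_append, List.length_cons, List.length_nil]
        omega
      · rw [toDigits_step n (by omega), toDigits_step m (by omega)]
        simp only [List.length_append, List.length_cons, List.length_nil]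
        have := ih (n / 10) (Nat.div_lt_self (by omega) (by omega)) (m / 10)
          (Nat.div_le_div_right h)
        omega

-- ---------- layers: characterization ----------
def pvDigitOK (v : Int) : Prop :=
  0 < v ∧ pvAll58 (Nat.toDigits 10 v.toNat) = true

theorem digitChar58 (d : Nat) (h : d < 10) :
    (Nat.digitChar d == '5' || Nat.digitChar d == '8') = true ↔ d = 5 ∨ d = 8 := by
  interval_cases d <;> simp [Nat.digitChar]

theorem mem_step (l : List Int) (v : Int) :
    v ∈ pvStep l ↔ ∃ g ∈ l, v = 10 * g + 5 ∨ v = 10 * g + 8 := by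
  simp only [pvStep, List.mem_flatMap, List.mem_cons, List.not_mem_nil, or_false]

theorem layers_mem (k : Nat) : ∀ v : Int, v ∈ pvLayers (k + 1) →
    pvDigitOK v ∧ (Nat.toDigits 10 v.toNat).length = k + 1 := by
  induction k with
  | zero =>
    intro v hv
    have : v = 5 ∨ v = 8 := by
      simpa [pvLayers, pvStep] using hv
    rcases this with h | h <;> subst h <;> exact ⟨⟨by omega, by decide⟩, by decide⟩
  | succ k ih =>
    intro v hv
    rw [show pvLayers (k + 1 + 1) = pvStep (pvLayers (k + 1)) from rfl, mem_step] at hv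
    obtain ⟨g, hg, hd⟩ := hv
    obtain ⟨⟨hgpos, hg58⟩, hglen⟩ := ih g hg
    have hd' : ∃ d : Nat, d < 10 ∧ (d = 5 ∨ d = 8) ∧ v = 10 * g + (d : Int) := by
      rcases hd with h | h
      · exact ⟨5, by omega, Or.inl rfl, by omega⟩
      · exact ⟨8, by omega, Or.inr rfl, by omega⟩
    obtain ⟨d, hd10, hd58, hveq⟩ := hd'
    have hvpos : 0 < v := by omega
    have htn : v.toNat = 10 * g.toNat + d := by omega
    have hdig : Nat.toDigits 10 v.toNat = Nat.toDigits 10 g.toNat ++ [Nat.digitChar d] := by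
      rw [htn, toDigits_mul_add g.toNat d (by omega) hd10]
    refine ⟨⟨hvpos, ?_⟩, ?_⟩
    · unfold pvAll58 at hg58 ⊢
      rw [hdig, List.all_append]
      simp only [List.all_cons, List.all_nil, Bool.and_true, Bool.and_eq_true]
      exact ⟨hg58, (digitChar58 d hd10).mpr hd58⟩
    · rw [hdig]; simp [hglen]

theorem layers_complete_nat (n : Nat) : 0 < n → pvAll58 (Nat.toDigits 10 n) = true →
    ∃ k : Nat, (Nat.toDigits 10 n).length = k + 1 ∧ (n : Int) ∈ pvLayers (k + 1) := by
  induction n using Nat.strong_induction_on with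
  | _ n ih =>
    intro hn h58
    by_cases hlt : n < 10
    · rw [toDigits_lt_ten n hlt] at h58 ⊢
      have : n = 5 ∨ n = 8 := by
        apply (digitChar58 n hlt).mp
        simpa [pvAll58] using h58
      refine ⟨0, by simp, ?_⟩
      rcases this with h | h <;> subst h <;> decide
    · rw [toDigits_step n (by omega)] at h58 ⊢
      simp only [pvAll58, List.all_append, List.all_cons, List.all_nil, Bool.and_true,
        Bool.and_eq_true] at h58
      obtain ⟨hq58, hdig⟩ := h58
      have hqpos : 0 < n / 10 := by omega
      obtain ⟨k, hklen, hkmem⟩ := ih (n / 10) (Nat.div_lt_self (by omega) (by omega)) hqpos hq58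
      refine ⟨k + 1, by simp [hklen], ?_⟩
      rw [show pvLayers (k + 1 + 1) = pvStep (pvLayers (k + 1)) from rfl, mem_step]
      refine ⟨(↑(n / 10) : Int), hkmem, ?_⟩
      have hd : n % 10 = 5 ∨ n % 10 = 8 := (digitChar58 (n % 10) (by omega)).mp hdig
      omega

theorem step_pairwise (l : List Int) (h : l.Pairwise (· < ·)) :
    (pvStep l).Pairwise (· < ·) := by
  induction l with
  | nil => simp [pvStep]
  | cons f t ih =>
    rw [List.pairwise_cons] at h
    have ht := ih h.2
    have hstep : pvStep (f :: t) = (10 * f + 5 : Int) :: (10 * f + 8 : Int) :: pvStep t := by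
      simp [pvStep]
    rw [hstep, List.pairwise_cons, List.pairwise_cons]
    refine ⟨?_, ?_, ht⟩
    · intro v hv
      rcases List.mem_cons.mp hv with hv | hv
      · omega
      · obtain ⟨g, hg, hd⟩ := (mem_step t v).mp hv
        have := h.1 g hg
        omega
    · intro v hv
      obtain ⟨g, hg, hd⟩ := (mem_step t v).mp hv
      have := h.1 g hg
      omega

theorem layers_nodup (k : Nat) : (pvLayers k).Nodup := by
  have : ∀ j : Nat, (pvLayers j).Pairwise (· < ·) := by
    intro j
    induction j with
    | zero => simp [pvLayers]
    | succ j ih => exact step_pairwise _ ih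
  exact (this k).imp (fun h => ne_of_lt h)

theorem predA_iff_digitOK (v : Int) : pvPredA v = true ↔ pvDigitOK v := by
  rw [predA_iff_all58]
  unfold PySem.Int.toChars pvDigitOK
  by_cases hneg : v < 0
  · rw [if_pos hneg]
    constructor
    · intro h
      exfalso
      simp [pvAll58] at h
    · intro h; omega
  · rw [if_neg hneg]
    constructor
    · intro h
      refine ⟨?_, h⟩
      by_contra h0
      have hv0 : v = 0 := by omega
      subst hv0
      simp [pvAll58, Nat.toDigits, Nat.toDigitsCore, Nat.digitChar] at h
    · exact fun h => h.2

-- ---------- A computes: countP over dedup of the triple sums ----------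
theorem a_raw (a b c : List Int) :
    getFortunate a b c = ((PySem.Set.ofList ((pvSums a b c).filter pvPredA)).length : Int) := by
  unfold getFortunate pvSums
  simp only [PySem.List.foldl_append_if, PySem.List.foldl_append_eq_flatMap, List.nil_append,
    List.filter_flatMap, List.filter_map, PySem.Set.len]
  rfl

theorem dedup_filter_len (p : Int → Bool) (l : List Int) :
    (PySem.Set.ofList (l.filter p)).length = (PySem.Set.ofList l).countP p := by
  rw [List.countP_eq_length_filter]
  apply List.Perm.length_eq
  rw [List.perm_ext_iff_of_nodup (PySem.Set.nodup_ofList _)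
    ((PySem.Set.nodup_ofList l).filter p)]
  intro x
  simp [PySem.Set.mem_ofList, List.mem_filter]

theorem a_eq (a b c : List Int) :
    getFortunate a b c = (((PySem.Set.ofList (pvSums a b c)).countP pvPredA : Nat) : Int) := by
  rw [a_raw, dedup_filter_len]

-- ---------- B computes: the layered count ----------
theorem fold_add_map (f : Int → Int) (c : List Int) (s : PySem.Set Int) :
    c.foldl (fun s three => PySem.Set.add s (f three)) s = (c.map f).foldl PySem.Set.add s := by
  rw [List.foldl_map]

theorem fold_add_flatMap (g : Int → List Int) (l : List Int) (s : PySem.Set Int) :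
    l.foldl (fun s x => (g x).foldl PySem.Set.add s) s = (l.flatMap g).foldl PySem.Set.add s := by
  induction l generalizing s with
  | nil => rfl
  | cons x t ih => simp [List.foldl_append, ih]

theorem memB_iff (limit : Int) (a b c : List Int) (f : Int) :
    pvPredB limit a b c f = true ↔ f ≤ limit ∧ f ∈ pvSums a b c := by
  unfold pvPredB
  have hab : a.foldl (fun s x => b.foldl (fun s y => PySem.Set.add s (x + y)) s) PySem.Set.empty
      = PySem.Set.ofList (a.flatMap (fun x => b.map (fun y => x + y))) := by
    simp only [fold_add_map, fold_add_flatMap]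
    rw [show (PySem.Set.empty : PySem.Set Int) = [] from rfl, ← PySem.Set.ofList_eq_foldl]
  rw [hab]
  simp only [Bool.and_eq_true, decide_eq_true_eq, List.any_eq_true, PySem.Set.contains_iff,
    PySem.Set.mem_ofList, List.mem_flatMap, List.mem_map, pvSums]
  constructor
  · rintro ⟨h1, z, hz, x, hx, y, hy, hxy⟩
    exact ⟨h1, x, hx, y, hy, z, hz, by omega⟩
  · rintro ⟨h1, x, hx, y, hy, z, hz, hxyz⟩
    exact ⟨h1, z, hz, x, hx, y, hy, by omega⟩

theorem foldl_ignore {α β : Type} (g : β → β) (l : List α) (st : β) :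
    l.foldl (fun s _ => g s) st = g^[l.length] st := by
  induction l generalizing st with
  | nil => rfl
  | cons x t ih => simp [List.foldl_cons, ih, Function.iterate_succ_apply]

def pvTail (m k : Nat) : List Int := (List.range k).flatMap (fun j => pvLayers (m + j + 1))

theorem pvTail_succ (m k : Nat) :
    pvTail m (k + 1) = pvLayers (m + 1) ++ pvTail (m + 1) k := by
  unfold pvTail
  rw [List.range_succ_eq_map]
  simp only [List.flatMap_cons, List.flatMap_map, Nat.add_zero]
  have h2 : (fun a => pvLayers (m + (a + 1) + 1)) = (fun j => pvLayers (m + 1 + j + 1)) := by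
    funext j; congr 1; omega
  rw [h2]

theorem iterG (p : Int → Bool) (k : Nat) : ∀ (m : Nat) (t : Int),
    (fun (st : List Int × Int) =>
      (pvStep st.1, (pvStep st.1).foldl
        (fun cnt f => if p f then cnt + 1 else cnt) st.2))^[k] (pvLayers m, t)
      = (pvLayers (m + k), t + ((pvTail m k).countP p : Int)) := by
  induction k with
  | zero => intro m t; simp [pvTail]
  | succ k ih =>
    intro m t
    rw [Function.iterate_succ_apply]
    have hstep : (pvStep (pvLayers m),
        (pvStep (pvLayers m)).foldl (fun cnt f => if p f then cnt + 1 else cnt) t)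
        = (pvLayers (m + 1), t + ((pvLayers (m + 1)).countP p : Int)) := by
      rw [PySem.List.foldl_count_if]
      rfl
    rw [hstep, ih (m + 1) (t + ((pvLayers (m + 1)).countP p : Int)), pvTail_succ]
    rw [show m + 1 + k = m + (k + 1) from by omega]
    refine Prod.ext rfl ?_
    simp only [List.countP_append]
    push_cast
    ring

theorem b_eq (a b c : List Int) (ha : a ≠ []) (hb : b ≠ []) (hc : c ≠ []) :
    getFortunate_alt a b c =
      ((pvTail 0 (PySem.Int.toChars
            ((PySem.List.max? a (fun x => x)).getD 0 + (PySem.List.max? b (fun x => x)).getD 0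
              + (PySem.List.max? c (fun x => x)).getD 0)).length).countP
        (pvPredB ((PySem.List.max? a (fun x => x)).getD 0 + (PySem.List.max? b (fun x => x)).getD 0
              + (PySem.List.max? c (fun x => x)).getD 0) a b c) : Int) := by
  unfold getFortunate_alt
  rw [if_neg (by simp [ha, hb, hc])]
  set limit := (PySem.List.max? a (fun x => x)).getD 0 + (PySem.List.max? b (fun x => x)).getD 0
      + (PySem.List.max? c (fun x => x)).getD 0 with hlimit
  simp only [PySem.Str.len_eq, PySem.Int.toList_toStr, PySem.List.pyRange_zero_natCast,
    List.foldl_map, foldl_ignore, List.length_range]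
  have := iterG (pvPredB limit a b c) (PySem.Int.toChars limit).length 0 0
  simp only [show pvLayers 0 = [0] from rfl] at this
  rw [show (fun (st : List Int × Int) =>
      (st.1.flatMap fun f => [10 * f + 5, 10 * f + 8],
        List.foldl (fun cnt f => if f ≤ limit && c.any (fun z => PySem.Set.contains
          (a.foldl (fun s x => b.foldl (fun s y => PySem.Set.add s (x + y)) s) PySem.Set.empty)
          (f - z)) then cnt + 1 else cnt) st.2 (st.1.flatMap fun f => [10 * f + 5, 10 * f + 8])))
      = (fun (st : List Int × Int) =>
      (pvStep st.1, (pvStep st.1).foldl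
        (fun cnt f => if pvPredB limit a b c f then cnt + 1 else cnt) st.2)) from rfl, this]
  simp

-- ---------- the counting bijection ----------
theorem sums_le_limit (a b c : List Int) (ha : a ≠ []) (hb : b ≠ []) (hc : c ≠ []) (v : Int)
    (hv : v ∈ pvSums a b c) :
    v ≤ (PySem.List.max? a (fun x => x)).getD 0 + (PySem.List.max? b (fun x => x)).getD 0
        + (PySem.List.max? c (fun x => x)).getD 0 := by
  obtain ⟨x, hx, y, hy, z, hz, hxyz⟩ : ∃ x ∈ a, ∃ y ∈ b, ∃ z ∈ c, x + y + z = v := by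
    simpa [pvSums, List.mem_flatMap, List.mem_map] using hv
  obtain ⟨ma, hma⟩ : ∃ m, PySem.List.max? a (fun x => x) = some m := by
    cases h : PySem.List.max? a (fun x => x) with
    | none => exact absurd ((PySem.List.max?_eq_none_iff a _).mp h) ha
    | some m => exact ⟨m, rfl⟩
  obtain ⟨mb, hmb⟩ : ∃ m, PySem.List.max? b (fun x => x) = some m := by
    cases h : PySem.List.max? b (fun x => x) with
    | none => exact absurd ((PySem.List.max?_eq_none_iff b _).mp h) hb
    | some m => exact ⟨m, rfl⟩
  obtain ⟨mc, hmc⟩ : ∃ m, PySem.List.max? c (fun x => x) = some m := by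
    cases h : PySem.List.max? c (fun x => x) with
    | none => exact absurd ((PySem.List.max?_eq_none_iff c _).mp h) hc
    | some m => exact ⟨m, rfl⟩
  have h1 := PySem.List.max?_isMax hma x hx
  have h2 := PySem.List.max?_isMax hmb y hy
  have h3 := PySem.List.max?_isMax hmc z hz
  simp only [hma, hmb, hmc, Option.getD_some]
  omega

theorem count_eq (a b c : List Int) (ha : a ≠ []) (hb : b ≠ []) (hc : c ≠ []) :
    ((PySem.Set.ofList (pvSums a b c)).countP pvPredA : Nat) =
      (pvTail 0 (PySem.Int.toChars
            ((PySem.List.max? a (fun x => x)).getD 0 + (PySem.List.max? b (fun x => x)).getD 0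
              + (PySem.List.max? c (fun x => x)).getD 0)).length).countP
        (pvPredB ((PySem.List.max? a (fun x => x)).getD 0 + (PySem.List.max? b (fun x => x)).getD 0
              + (PySem.List.max? c (fun x => x)).getD 0) a b c) := by
  set limit := (PySem.List.max? a (fun x => x)).getD 0 + (PySem.List.max? b (fun x => x)).getD 0
      + (PySem.List.max? c (fun x => x)).getD 0 with hlimit
  set D := (PySem.Int.toChars limit).length with hD
  rw [List.countP_eq_length_filter, List.countP_eq_length_filter]
  apply List.Perm.length_eq
  have hnd1 : ((PySem.Set.ofList (pvSums a b c)).filter pvPredA).Nodup :=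
    (PySem.Set.nodup_ofList _).filter _
  have hnd2 : ((pvTail 0 D).filter (pvPredB limit a b c)).Nodup := by
    apply List.Nodup.filter
    unfold pvTail
    rw [List.nodup_flatMap]
    refine ⟨fun j _ => layers_nodup (0 + j + 1), ?_⟩
    apply List.Pairwise.imp ?_ (List.pairwise_lt_range (n := D))
    intro j j' hjj' v hv hv'
    have h1 := (layers_mem (0 + j) v hv).2
    have h2 := (layers_mem (0 + j') v hv').2
    omega
  rw [List.perm_ext_iff_of_nodup hnd1 hnd2]
  intro x
  simp only [List.mem_filter, PySem.Set.mem_ofList]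
  rw [memB_iff]
  constructor
  · rintro ⟨hmem, hpred⟩
    have hok := (predA_iff_digitOK x).mp hpred
    have hxpos : 0 < x := hok.1
    have hle : x ≤ limit := sums_le_limit a b c ha hb hc x hmem
    obtain ⟨k, hklen, hkmem⟩ := layers_complete_nat x.toNat (by omega) hok.2
    have hlimpos : 0 < limit := by omega
    have hDlen : D = (Nat.toDigits 10 limit.toNat).length := by
      rw [hD]
      unfold PySem.Int.toChars
      rw [if_neg (by omega)]
    have hkD : k < D := by
      have := toDigits_length_mono limit.toNat x.toNat (by omega)
      omega
    refine ⟨?_, hle, hmem⟩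
    unfold pvTail
    rw [List.mem_flatMap]
    refine ⟨k, List.mem_range.mpr hkD, ?_⟩
    have : (↑x.toNat : Int) = x := by omega
    rw [show (0 + k + 1) = k + 1 from by omega, ← this]
    exact hkmem
  · rintro ⟨hmem, hle, hsum⟩
    refine ⟨hsum, ?_⟩
    unfold pvTail at hmem
    rw [List.mem_flatMap] at hmem
    obtain ⟨j, _, hj⟩ := hmem
    exact (predA_iff_digitOK x).mpr (layers_mem (0 + j) x hj).1

-- ===== VERDICT (by name: the statement is the Claim_ definition above) =====
theorem getFortunate_spec : Claim_equal_getFortunate := by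
  intro a b c _
  show getFortunate a b c = getFortunate_alt a b c
  by_cases ha : a = []
  · subst ha
    simp [getFortunate, getFortunate_alt, PySem.Set.len, PySem.Set.ofList]
  · by_cases hb : b = []
    · subst hb
      simp [getFortunate, getFortunate_alt, PySem.Set.len, PySem.Set.ofList]
    · by_cases hc : c = []
      · subst hc
        simp [getFortunate, getFortunate_alt, PySem.Set.len, PySem.Set.ofList]
      · rw [a_eq, b_eq a b c ha hb hc, count_eq a b c ha hb hc]
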